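-- pv_equiv track=rewrite | github.com/tyevans/utau_voicebank_manager | src/backend/services/paragraph_segmentation_service.py | _extract_basic_phonemes
-- ===== SOURCE A (Python) =====
-- def _extract_basic_phonemes(word: str) -> list[str]:
--     """Extract basic CV phonemes from a romaji word.
--
--     This is a simplified extraction for when full phoneme data
--     is not available. For better results, use a proper phoneme
--     library.
--
--     Args:
--         word: Romaji word (e.g., "akai")
--
--     Returns:
--         List of phonemes (e.g., ["a", "ka", "i"])
--     """
--     phonemes: list[str] = []
--     word = word.lower()
--     i = 0
--
--     # Japanese vowels
--     vowels = set("aiueo")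
--
--     # Two-character consonant combinations
--     two_char_consonants = {
--         "sh",
--         "ch",
--         "ts",
--         "ky",
--         "gy",
--         "ny",
--         "hy",
--         "my",
--         "ry",
--         "py",
--         "by",
--     }
--
--     while i < len(word):
--         # Check for two-character consonant + vowel (e.g., "sha", "chi")
--         if i + 2 < len(word) and word[i : i + 2] in two_char_consonants:
--             if word[i + 2] in vowels:
--                 phonemes.append(word[i : i + 3])
--                 i += 3
--                 continue
--             else:
--                 # Just the consonant cluster
--                 phonemes.append(word[i : i + 2])
--                 i += 2
--                 continue
--
--         # Check for consonant + vowel (e.g., "ka", "sa")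
--         if i + 1 < len(word) and word[i] not in vowels and word[i + 1] in vowels:
--             phonemes.append(word[i : i + 2])
--             i += 2
--             continue
--
--         # Single vowel
--         if word[i] in vowels:
--             phonemes.append(word[i])
--             i += 1
--             continue
--
--         # Special case: "n" at end or before consonant (syllabic n)
--         if word[i] == "n" and (i + 1 >= len(word) or word[i + 1] not in vowels):
--             phonemes.append("n")
--             i += 1
--             continue
--
--         # Fallback: single character
--         phonemes.append(word[i])
--         i += 1
--
--     return phonemes
-- ===== SOURCE B (Python) =====
-- import re
--
-- _CLUSTER = "sh|ch|ts|ky|gy|ny|hy|my|ry|py|by"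
-- _TOKEN = re.compile(
--     rf"(?:{_CLUSTER})[aiueo]"      # cluster + vowel, e.g. "sha"
--     rf"|(?:{_CLUSTER})(?=[^aiueo])"  # bare cluster followed by a non-vowel
--     r"|[^aiueo][aiueo]"            # consonant + vowel, e.g. "ka"
--     r"|.",                          # fallback: single character (vowel, syllabic n, anything)
--     re.DOTALL,
-- )
--
-- def _extract_basic_phonemes(word: str) -> list[str]:
--     return _TOKEN.findall(word.lower())
-- ===== Notes on version B (the rewrite author's own statement) =====
-- stated objective: idiomatic
-- what changed: Replaces A's hand-written index loop with explicit branch bookkeeping by one compiled regex (ordered alternation: cluster+vowel, cluster with non-vowel lookahead, consonant+vowel, any-char fallback with DOTALL) iterated over the lowered word via findall.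
import Mathlib
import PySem

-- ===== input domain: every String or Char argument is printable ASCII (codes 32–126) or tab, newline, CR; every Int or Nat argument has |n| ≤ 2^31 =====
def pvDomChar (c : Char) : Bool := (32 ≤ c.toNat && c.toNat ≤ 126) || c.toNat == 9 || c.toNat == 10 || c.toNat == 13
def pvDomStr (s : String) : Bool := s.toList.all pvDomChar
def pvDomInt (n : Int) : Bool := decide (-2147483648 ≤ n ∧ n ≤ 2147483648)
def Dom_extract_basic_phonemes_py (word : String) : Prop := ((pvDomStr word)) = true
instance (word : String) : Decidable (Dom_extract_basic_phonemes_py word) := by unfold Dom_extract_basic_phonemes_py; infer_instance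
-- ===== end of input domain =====

-- B replaces A's hand-written index/branch scanner by one ordered-alternation token matcher
-- (in Python: a single compiled regex iterated over the lowered word); objective: idiomatic.

-- ===== PORT A =====
-- vowels = set("aiueo")
def pvAvowels : PySem.Set Char := PySem.Set.ofList ['a', 'i', 'u', 'e', 'o']

-- two_char_consonants = {"sh", "ch", ...}
def pvAclusters : PySem.Set (List Char) := PySem.Set.ofList
  [['s','h'], ['c','h'], ['t','s'], ['k','y'], ['g','y'], ['n','y'],
   ['h','y'], ['m','y'], ['r','y'], ['p','y'], ['b','y']]

-- the while loop, state = (i, phonemes); tokens kept as List Char, joined to String at the end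
def pvAloop (w : List Char) (i : Nat) (acc : List (List Char)) : List (List Char) :=
  if _h : i < w.length then
    if i + 2 < w.length ∧ pvAclusters.contains (PySem.List.slice w (some (i : Int)) (some ((i : Int) + 2))) then
      if pvAvowels.contains (PySem.List.pyGetD w ((i : Int) + 2) ' ') then
        pvAloop w (i + 3) (acc ++ [PySem.List.slice w (some (i : Int)) (some ((i : Int) + 3))])
      else
        pvAloop w (i + 2) (acc ++ [PySem.List.slice w (some (i : Int)) (some ((i : Int) + 2))])
    else if i + 1 < w.length ∧ ¬ pvAvowels.contains (PySem.List.pyGetD w (i : Int) ' ')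
            ∧ pvAvowels.contains (PySem.List.pyGetD w ((i : Int) + 1) ' ') then
      pvAloop w (i + 2) (acc ++ [PySem.List.slice w (some (i : Int)) (some ((i : Int) + 2))])
    else if pvAvowels.contains (PySem.List.pyGetD w (i : Int) ' ') then
      pvAloop w (i + 1) (acc ++ [[PySem.List.pyGetD w (i : Int) ' ']])
    else if PySem.List.pyGetD w (i : Int) ' ' = 'n'
            ∧ (i + 1 ≥ w.length ∨ ¬ pvAvowels.contains (PySem.List.pyGetD w ((i : Int) + 1) ' ')) then
      pvAloop w (i + 1) (acc ++ [['n']])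
    else
      pvAloop w (i + 1) (acc ++ [[PySem.List.pyGetD w (i : Int) ' ']])
  else acc
termination_by w.length - i
decreasing_by all_goals omega

def extract_basic_phonemes_py (word : String) : List String :=
  (pvAloop (PySem.Chars.lower word.toList) 0 []).map (fun t => String.ofList t)

-- ===== PORT B =====
-- the alternation "sh|ch|ts|ky|gy|ny|hy|my|ry|py|by" as a two-char test
def pvBisCluster (c1 c2 : Char) : Bool :=
  (c1 == 's' && c2 == 'h') || (c1 == 'c' && c2 == 'h') || (c1 == 't' && c2 == 's') ||
  (c1 == 'k' && c2 == 'y') || (c1 == 'g' && c2 == 'y') || (c1 == 'n' && c2 == 'y') ||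
  (c1 == 'h' && c2 == 'y') || (c1 == 'm' && c2 == 'y') || (c1 == 'r' && c2 == 'y') ||
  (c1 == 'p' && c2 == 'y') || (c1 == 'b' && c2 == 'y')

-- the character class [aiueo]
def pvBisVowel (c : Char) : Bool :=
  c == 'a' || c == 'i' || c == 'u' || c == 'e' || c == 'o'

-- finditer over the compiled pattern: at each position try, in order,
-- cluster+vowel / cluster(?=[^aiueo]) / [^aiueo][aiueo] / .
def pvBtok : List Char → List (List Char)
  | c1 :: c2 :: c3 :: rest =>
    if pvBisCluster c1 c2 then
      if pvBisVowel c3 then [c1, c2, c3] :: pvBtok rest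
      else [c1, c2] :: pvBtok (c3 :: rest)
    else if !pvBisVowel c1 && pvBisVowel c2 then [c1, c2] :: pvBtok (c3 :: rest)
    else [c1] :: pvBtok (c2 :: c3 :: rest)
  | [c1, c2] =>
    if pvBisCluster c1 c2 then [c1] :: pvBtok [c2]   -- lookahead fails with no next char: '.' matches c1
    else if !pvBisVowel c1 && pvBisVowel c2 then [[c1, c2]]
    else [c1] :: pvBtok [c2]
  | [c1] => [[c1]]
  | [] => []


def extract_basic_phonemes_py_alt (word : String) : List String :=
  (pvBtok (PySem.Chars.lower word.toList)).map (fun t => String.ofList t)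

-- ===== PRECONDITION & SPEC =====
def Spec_extract_basic_phonemes_py (word : String) (out : List String) : Prop := out = extract_basic_phonemes_py_alt word
instance (word : String) (out : List String) : Decidable (Spec_extract_basic_phonemes_py word out) := by unfold Spec_extract_basic_phonemes_py; infer_instance

-- ===== CLAIM (what is proved, stated in full; the proofs are below) =====
def Claim_equal_extract_basic_phonemes_py : Prop := ∀ (word : String), Dom_extract_basic_phonemes_py word → Spec_extract_basic_phonemes_py word (extract_basic_phonemes_py word)

-- ===== LEMMAS AND PROOFS =====

-- A's set membership of the two-char slice is B's cluster test
lemma pv_cluster_bridge (c1 c2 : Char) :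
    pvAclusters.contains [c1, c2] = pvBisCluster c1 c2 := by
  have h : pvAclusters = [['s','h'], ['c','h'], ['t','s'], ['k','y'], ['g','y'], ['n','y'],
      ['h','y'], ['m','y'], ['r','y'], ['p','y'], ['b','y']] := by decide
  simp only [PySem.Set.contains, h]
  rw [Bool.eq_iff_iff]
  simp [pvBisCluster, List.contains_eq_mem, or_assoc]

-- A's vowel-set membership is B's vowel test
lemma pv_vowel_bridge (c : Char) :
    pvAvowels.contains c = pvBisVowel c := by
  have h : pvAvowels = ['a', 'i', 'u', 'e', 'o'] := by decide
  simp only [PySem.Set.contains, h]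
  rw [Bool.eq_iff_iff]
  simp [pvBisVowel, List.contains_eq_mem, or_assoc]

-- the second character of a cluster is never a vowel
lemma pv_cluster_snd_not_vowel (c1 c2 : Char) (h : pvBisCluster c1 c2 = true) :
    pvBisVowel c2 = false := by
  by_contra hv
  simp only [Bool.not_eq_false, pvBisVowel, Bool.or_eq_true, beq_iff_eq] at hv
  simp only [pvBisCluster, Bool.or_eq_true, Bool.and_eq_true, beq_iff_eq] at h
  rcases hv with (((rfl|rfl)|rfl)|rfl)|rfl <;> simp_all

-- index / slice normalisation
lemma pv_getD0 (w : List Char) (i : Nat) (h : i < w.length) :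
    PySem.List.pyGetD w (i : Int) ' ' = w[i] := by
  rw [PySem.List.pyGetD_natCast]; exact List.getD_eq_getElem w ' ' h

lemma pv_getD1 (w : List Char) (i : Nat) (h : i + 1 < w.length) :
    PySem.List.pyGetD w ((i : Int) + 1) ' ' = w[i + 1] := by
  have e : (i : Int) + 1 = ((i + 1 : Nat) : Int) := by push_cast; ring
  rw [e, PySem.List.pyGetD_natCast]; exact List.getD_eq_getElem w ' ' h

lemma pv_getD2 (w : List Char) (i : Nat) (h : i + 2 < w.length) :
    PySem.List.pyGetD w ((i : Int) + 2) ' ' = w[i + 2] := by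
  have e : (i : Int) + 2 = ((i + 2 : Nat) : Int) := by push_cast; ring
  rw [e, PySem.List.pyGetD_natCast]; exact List.getD_eq_getElem w ' ' h

lemma pv_drop1 (w : List Char) (i : Nat) (h : i < w.length) :
    w.drop i = w[i] :: w.drop (i + 1) := List.drop_eq_getElem_cons h

lemma pv_drop2 (w : List Char) (i : Nat) (h : i + 1 < w.length) :
    w.drop i = w[i]'(by omega) :: w[i + 1] :: w.drop (i + 2) := by
  rw [pv_drop1 w i (by omega), pv_drop1 w (i + 1) h]

lemma pv_drop3 (w : List Char) (i : Nat) (h : i + 2 < w.length) :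
    w.drop i = w[i]'(by omega) :: w[i + 1]'(by omega) :: w[i + 2] :: w.drop (i + 3) := by
  rw [pv_drop2 w i (by omega), pv_drop1 w (i + 2) h]

lemma pv_slice2 (w : List Char) (i : Nat) (h : i + 1 < w.length) :
    PySem.List.slice w (some (i : Int)) (some ((i : Int) + 2)) = [w[i]'(by omega), w[i + 1]] := by
  have e : (i : Int) + 2 = ((i : Nat) : Int) + ((2 : Nat) : Int) := by push_cast; ring
  rw [e, PySem.List.slice_natCast_add, pv_drop2 w i h]
  rfl

lemma pv_slice3 (w : List Char) (i : Nat) (h : i + 2 < w.length) :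
    PySem.List.slice w (some (i : Int)) (some ((i : Int) + 3)) =
      [w[i]'(by omega), w[i + 1]'(by omega), w[i + 2]] := by
  have e : (i : Int) + 3 = ((i : Nat) : Int) + ((3 : Nat) : Int) := by push_cast; ring
  rw [e, PySem.List.slice_natCast_add, pv_drop3 w i h]
  rfl

-- A's guard expressions, read off at decomposed positions
lemma pv_vow0 (w : List Char) (i : Nat) (h : i < w.length) :
    pvAvowels.contains (PySem.List.pyGetD w (i : Int) ' ') = pvBisVowel w[i] := by
  rw [pv_getD0 w i h, pv_vowel_bridge]

lemma pv_vow1 (w : List Char) (i : Nat) (h : i + 1 < w.length) :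
    pvAvowels.contains (PySem.List.pyGetD w ((i : Int) + 1) ' ') = pvBisVowel w[i + 1] := by
  rw [pv_getD1 w i h, pv_vowel_bridge]

lemma pv_vow2 (w : List Char) (i : Nat) (h : i + 2 < w.length) :
    pvAvowels.contains (PySem.List.pyGetD w ((i : Int) + 2) ' ') = pvBisVowel w[i + 2] := by
  rw [pv_getD2 w i h, pv_vowel_bridge]

lemma pv_clu (w : List Char) (i : Nat) (h : i + 1 < w.length) :
    pvAclusters.contains (PySem.List.slice w (some (i : Int)) (some ((i : Int) + 2)))
      = pvBisCluster (w[i]'(by omega)) w[i + 1] := by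
  rw [pv_slice2 w i h, pv_cluster_bridge]

-- B's two cluster-led steps, on an explicit three-character head
lemma pv_tok3 (c1 c2 c3 : Char) (r : List Char) (hc : pvBisCluster c1 c2 = true)
    (hv : pvBisVowel c3 = true) :
    pvBtok (c1 :: c2 :: c3 :: r) = [c1, c2, c3] :: pvBtok r := by
  rw [pvBtok]; simp [hc, hv]

lemma pv_tok2c (c1 c2 c3 : Char) (r : List Char) (hc : pvBisCluster c1 c2 = true)
    (hv : pvBisVowel c3 = false) :
    pvBtok (c1 :: c2 :: c3 :: r) = [c1, c2] :: pvBtok (c3 :: r) := by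
  rw [pvBtok]; simp [hc, hv]

-- one single-character token step of B, under A's two failed multi-character guards
lemma pv_single_step (w : List Char) (i : Nat) (h : i < w.length)
    (hng : ∀ (h2 : i + 2 < w.length), pvBisCluster w[i] (w[i + 1]'(by omega)) = false)
    (hncv : ∀ (h1 : i + 1 < w.length), pvBisVowel w[i] = false → pvBisVowel w[i + 1] = false) :
    pvBtok (w.drop i) = [w[i]] :: pvBtok (w.drop (i + 1)) := by
  rcases hlen : w.drop (i + 1) with - | ⟨b, rest2⟩
  · rw [pv_drop1 w i h, hlen]
    simp [pvBtok]
  · have h1 : i + 1 < w.length := by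
      have hl : (w.drop (i + 1)).length = w.length - (i + 1) := List.length_drop ..
      rw [hlen] at hl; simp at hl; omega
    have hb : b = w[i + 1] := by
      have hd := pv_drop1 w (i + 1) h1
      rw [hlen] at hd
      exact (List.cons_eq_cons.mp hd).1
    subst hb
    rw [pv_drop1 w i h, hlen]
    rcases rest2 with - | ⟨c, rest3⟩
    · -- exactly two characters left
      rcases hcb : pvBisCluster w[i] w[i + 1] with - | -
      · rcases hv0 : pvBisVowel w[i] with - | -
        · have hv1 := hncv h1 hv0
          simp [pvBtok, hcb, hv0, hv1]
        · simp [pvBtok, hcb, hv0]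
      · simp [pvBtok, hcb]
    · -- three or more characters left
      have h2 : i + 2 < w.length := by
        have hl : (w.drop (i + 1)).length = w.length - (i + 1) := List.length_drop ..
        rw [hlen] at hl; simp at hl; omega
      have hcb := hng h2
      rcases hv0 : pvBisVowel w[i] with - | -
      · have hv1 := hncv h1 hv0
        simp [pvBtok, hcb, hv0, hv1]
      · simp [pvBtok, hcb, hv0]

-- B's consonant+vowel step
lemma pv_cv_step (w : List Char) (i : Nat) (h1 : i + 1 < w.length)
    (hcb : pvBisCluster (w[i]'(by omega)) w[i + 1] = false)
    (hv0 : pvBisVowel (w[i]'(by omega)) = false) (hv1 : pvBisVowel w[i + 1] = true) :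
    pvBtok (w.drop i) = [w[i]'(by omega), w[i + 1]] :: pvBtok (w.drop (i + 2)) := by
  rcases hlen : w.drop (i + 2) with - | ⟨c, rest⟩ <;>
    rw [pv_drop2 w i h1, hlen] <;> simp [pvBtok, hcb, hv0, hv1]

-- the loop of A computes B's tokenisation of the remaining suffix
lemma pvAloop_eq_tok (w : List Char) (i : Nat) (acc : List (List Char)) :
    pvAloop w i acc = acc ++ pvBtok (w.drop i) := by
  induction i, acc using pvAloop.induct (w := w) with
  | case1 i acc h hg hv ih =>
    obtain ⟨h2, hcl⟩ := hg
    rw [pv_clu w i (by omega)] at hcl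
    rw [pv_vow2 w i h2] at hv
    conv_lhs => rw [pvAloop]
    rw [dif_pos h, if_pos ⟨h2, by rw [pv_clu w i (by omega)]; exact hcl⟩,
        if_pos (by rw [pv_vow2 w i h2]; exact hv), ih,
        pv_slice3 w i h2, pv_drop3 w i h2, pv_tok3 _ _ _ _ hcl hv]
    simp
  | case2 i acc h hg hv ih =>
    obtain ⟨h2, hcl⟩ := hg
    rw [pv_clu w i (by omega)] at hcl
    rw [pv_vow2 w i h2, Bool.not_eq_true] at hv
    conv_lhs => rw [pvAloop]
    rw [dif_pos h, if_pos ⟨h2, by rw [pv_clu w i (by omega)]; exact hcl⟩,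
        if_neg (by rw [pv_vow2 w i h2]; simp [hv]), ih,
        pv_slice2 w i (by omega), pv_drop3 w i h2, pv_tok2c _ _ _ _ hcl hv,
        ← pv_drop1 w (i + 2) h2]
    simp
  | case3 i acc h hng hcv ih =>
    obtain ⟨h1, hnv0, hv1⟩ := hcv
    rw [pv_vow0 w i (by omega), Bool.not_eq_true] at hnv0
    rw [pv_vow1 w i h1] at hv1
    have hcb : pvBisCluster (w[i]'(by omega)) w[i + 1] = false := by
      rcases hcc : pvBisCluster (w[i]'(by omega)) w[i + 1] with - | -
      · rfl
      · rw [pv_cluster_snd_not_vowel _ _ hcc] at hv1; cases hv1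
    conv_lhs => rw [pvAloop]
    rw [dif_pos h, if_neg hng,
        if_pos ⟨h1, by rw [pv_vow0 w i (by omega)]; simp [hnv0],
                by rw [pv_vow1 w i h1]; exact hv1⟩, ih,
        pv_slice2 w i h1, pv_cv_step w i h1 hcb hnv0 hv1]
    simp
  | case4 i acc h hng hncv hv ih =>
    rw [pv_vow0 w i h] at hv
    conv_lhs => rw [pvAloop]
    rw [dif_pos h, if_neg hng, if_neg hncv,
        if_pos (by rw [pv_vow0 w i h]; exact hv), ih, pv_getD0 w i h,
        pv_single_step w i h
          (fun h2 => by
            rcases hcc : pvBisCluster w[i] (w[i + 1]'(by omega)) with - | -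
            · rfl
            · exact absurd ⟨h2, by rw [pv_clu w i (by omega)]; exact hcc⟩ hng)
          (fun h1 hf => by rw [hv] at hf; cases hf)]
    simp
  | case5 i acc h hng hncv hnv hn ih =>
    obtain ⟨hn, -⟩ := hn
    rw [pv_getD0 w i h] at hn
    rw [pv_vow0 w i h, Bool.not_eq_true] at hnv
    conv_lhs => rw [pvAloop]
    rw [dif_pos h, if_neg hng, if_neg hncv,
        if_neg (by rw [pv_vow0 w i h]; simp [hnv]),
        if_pos ⟨by rw [pv_getD0 w i h]; exact hn, by
          rcases Nat.lt_or_ge (i + 1) w.length with h1 | h1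
          · right
            rw [pv_vow1 w i h1]
            intro hv1
            exact absurd ⟨h1, by rw [pv_vow0 w i h]; simp [hnv],
              by rw [pv_vow1 w i h1]; exact hv1⟩ hncv
          · left; exact h1⟩, ih,
        pv_single_step w i h
          (fun h2 => by
            rcases hcc : pvBisCluster w[i] (w[i + 1]'(by omega)) with - | -
            · rfl
            · exact absurd ⟨h2, by rw [pv_clu w i (by omega)]; exact hcc⟩ hng)
          (fun h1 hf => by
            rcases hv1 : pvBisVowel w[i + 1] with - | -
            · rfl
            · exact absurd ⟨h1, by rw [pv_vow0 w i h]; simp [hnv],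
                by rw [pv_vow1 w i h1]; exact hv1⟩ hncv), hn]
    simp
  | case6 i acc h hng hncv hnv hnn ih =>
    rw [pv_vow0 w i h, Bool.not_eq_true] at hnv
    conv_lhs => rw [pvAloop]
    rw [dif_pos h, if_neg hng, if_neg hncv,
        if_neg (by rw [pv_vow0 w i h]; simp [hnv]), if_neg hnn, ih,
        pv_getD0 w i h,
        pv_single_step w i h
          (fun h2 => by
            rcases hcc : pvBisCluster w[i] (w[i + 1]'(by omega)) with - | -
            · rfl
            · exact absurd ⟨h2, by rw [pv_clu w i (by omega)]; exact hcc⟩ hng)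
          (fun h1 hf => by
            rcases hv1 : pvBisVowel w[i + 1] with - | -
            · rfl
            · exact absurd ⟨h1, by rw [pv_vow0 w i h]; simp [hnv],
                by rw [pv_vow1 w i h1]; exact hv1⟩ hncv)]
    simp
  | case7 i acc h =>
    rw [pvAloop, dif_neg h, List.drop_eq_nil_of_le (by omega)]
    simp [pvBtok]

theorem pv_main (word : String) :
    extract_basic_phonemes_py word = extract_basic_phonemes_py_alt word := by
  unfold extract_basic_phonemes_py extract_basic_phonemes_py_alt
  rw [pvAloop_eq_tok]
  simp

-- ===== VERDICT (by name: the statement is the Claim_ definition above) =====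
theorem extract_basic_phonemes_py_spec : Claim_equal_extract_basic_phonemes_py := by
  intro word _
  unfold Spec_extract_basic_phonemes_py
  exact pv_main word
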